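-- pv_equiv track=rewrite | github.com/pypi-data/pypi-mirror-385 | packages/isekai-django/isekai_django-0.1.0a4-py3-none-any.whl/isekai/utils/graphs.py | build_condensation
-- ===== SOURCE A (Python) =====
-- Node = str
--
-- Edge = tuple[Node, Node]
--
-- def build_condensation(
--     edges: list[Edge], comp_id: dict[Node, int], k: int
-- ) -> dict[int, set[int]]:
--     """Return DAG as dict: comp -> set(of neighbor comps)."""
--     dag: dict[int, set[int]] = {i: set() for i in range(k)}
--     for u, v in edges:
--         cu, cv = comp_id[u], comp_id[v]
--         if cu != cv:
--             dag[cu].add(cv)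
--     return dag
-- ===== SOURCE B (Python) =====
-- def build_condensation(edges, comp_id, k):
--     """Return DAG as dict: comp -> set(of neighbor comps)."""
--     pairs = []
--     for u, v in edges:
--         cu, cv = comp_id[u], comp_id[v]
--         if cu != cv:
--             pairs.append((cu, cv))
--     return {i: {cv for (cu, cv) in pairs if cu == i} for i in range(k)}
-- ===== Notes on version B (the rewrite author's own statement) =====
-- stated objective: alternative
-- what changed: Replaces A's single pass that mutates per-component sets inside a pre-built dict with two phases: first collect the cross-component (cu,cv) pairs in one pass over edges, then build the whole result as a comprehension over range(k) filtering that pair list per component.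
import Mathlib
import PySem

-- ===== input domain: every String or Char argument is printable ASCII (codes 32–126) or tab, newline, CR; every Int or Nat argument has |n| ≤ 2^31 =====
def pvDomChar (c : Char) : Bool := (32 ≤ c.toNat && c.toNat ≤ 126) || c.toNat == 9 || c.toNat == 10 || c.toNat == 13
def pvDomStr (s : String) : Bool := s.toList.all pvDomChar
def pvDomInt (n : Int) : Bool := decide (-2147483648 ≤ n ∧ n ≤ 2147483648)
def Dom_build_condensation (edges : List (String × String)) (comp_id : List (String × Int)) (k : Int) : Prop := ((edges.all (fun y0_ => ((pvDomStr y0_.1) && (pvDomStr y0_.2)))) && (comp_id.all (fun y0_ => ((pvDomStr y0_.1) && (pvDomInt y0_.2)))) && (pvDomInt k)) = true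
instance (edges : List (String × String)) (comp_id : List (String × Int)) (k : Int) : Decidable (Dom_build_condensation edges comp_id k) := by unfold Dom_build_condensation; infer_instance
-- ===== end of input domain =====

-- ===== PORT A =====
-- B changes the decomposition: A does one distributing pass mutating per-component sets;
-- B collects cross-component pairs first, then builds each component's set by filtering.
-- comp_id[x] on the association list: first match (Python dict lookup).
def pvLook? (comp_id : List (String × Int)) (x : String) : Option Int :=
  (comp_id.find? (fun p => p.1 == x)).map (·.2)

-- total lookup used by both ports; the 0 default is never reached under Pre_ (KeyError excluded there)
def pvLookD (comp_id : List (String × Int)) (x : String) : Int :=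
  (pvLook? comp_id x).getD 0

def build_condensation (edges : List (String × String)) (comp_id : List (String × Int)) (k : Int) : List (Int × List Int) :=
  -- dag = {i: set() for i in range(k)}
  let dag : PySem.Dict Int (PySem.Set Int) :=
    (PySem.List.pyRange 0 k 1).foldl (fun d i => d.insert i PySem.Set.empty) PySem.Dict.empty
  -- for u, v in edges: cu, cv = comp_id[u], comp_id[v]; if cu != cv: dag[cu].add(cv)
  -- (dag[cu] exists under Pre_, so modify hits an existing key there)
  let dag := edges.foldl (fun d e =>
    let cu := pvLookD comp_id e.1
    let cv := pvLookD comp_id e.2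
    if cu ≠ cv then d.modify cu PySem.Set.empty (fun s => PySem.Set.add s cv) else d) dag
  dag.items

-- ===== PORT B =====
def build_condensation_alt (edges : List (String × String)) (comp_id : List (String × Int)) (k : Int) : List (Int × List Int) :=
  -- pairs = []; for u, v in edges: cu, cv = comp_id[u], comp_id[v]; if cu != cv: pairs.append((cu, cv))
  let pairs : List (Int × Int) := edges.foldl (fun acc e =>
    let cu := pvLookD comp_id e.1
    let cv := pvLookD comp_id e.2
    if cu ≠ cv then acc ++ [(cu, cv)] else acc) []
  -- {i: {cv for (cu, cv) in pairs if cu == i} for i in range(k)}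
  (PySem.List.pyRange 0 k 1).map (fun i =>
    (i, PySem.Set.ofList ((pairs.filter (fun p => p.1 == i)).map (·.2))))

-- ===== PRECONDITION & SPEC =====
-- Pre_ = exactly where A returns: every edge endpoint is a key of comp_id (else KeyError at
-- comp_id[u]/comp_id[v]), and every cross-component source cu lies in range(k) (else KeyError at dag[cu]).
def Pre_build_condensation (edges : List (String × String)) (comp_id : List (String × Int)) (k : Int) : Prop :=
  ∀ e ∈ edges, (pvLook? comp_id e.1).isSome ∧ (pvLook? comp_id e.2).isSome ∧
    (pvLookD comp_id e.1 ≠ pvLookD comp_id e.2 →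
      0 ≤ pvLookD comp_id e.1 ∧ pvLookD comp_id e.1 < k)
instance (edges : List (String × String)) (comp_id : List (String × Int)) (k : Int) : Decidable (Pre_build_condensation edges comp_id k) := by unfold Pre_build_condensation; infer_instance

def pvWitness_build_condensation : (List (String × String)) × (List (String × Int)) × Int :=
  ([("a", "b"), ("b", "c"), ("c", "c")], [("a", 0), ("b", 1), ("c", 1)], 2)

def Spec_build_condensation (edges : List (String × String)) (comp_id : List (String × Int)) (k : Int) (out : List (Int × List Int)) : Prop := out = build_condensation_alt edges comp_id k
instance (edges : List (String × String)) (comp_id : List (String × Int)) (k : Int) (out : List (Int × List Int)) : Decidable (Spec_build_condensation edges comp_id k out) := by unfold Spec_build_condensation; infer_instance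

-- ===== CLAIM (what is proved, stated in full; the proofs are below) =====
def Claim_equal_build_condensation : Prop := ∀ (edges : List (String × String)) (comp_id : List (String × Int)) (k : Int), Dom_build_condensation edges comp_id k → Pre_build_condensation edges comp_id k → Spec_build_condensation edges comp_id k (build_condensation edges comp_id k)


-- ===== LEMMAS AND PROOFS =====

-- modify at a key present in a dict of shape r.map (i, g i) updates that entry pointwise
lemma items_modify_shape (r : List Int) (g : Int → PySem.Set Int) (d : PySem.Dict Int (PySem.Set Int))
    (cu cv : Int) (hnd : r.Nodup) (hd : d.items = r.map (fun i => (i, g i))) (hmem : cu ∈ r) :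
    (d.modify cu PySem.Set.empty (fun s => PySem.Set.add s cv)).items =
      r.map (fun i => (i, if i = cu then PySem.Set.add (g cu) cv else g i)) := by
  have hk : d.keys = r := by simp [PySem.Dict.keys, hd, Function.comp_def]
  have hmi : (cu, g cu) ∈ d.items := by rw [hd]; exact List.mem_map_of_mem hmem
  have hget : d.getD cu PySem.Set.empty = g cu :=
    PySem.Dict.getD_of_mem_items d hmi (by rw [hk]; exact hnd) _
  have hc : d.contains cu = true := by
    rw [PySem.Dict.contains_iff_mem_keys, hk]; exact hmem
  show (d.insert cu (PySem.Set.add (d.getD cu PySem.Set.empty) cv)).items = _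
  rw [PySem.Dict.items_insert_of_contains d _ hc, hget, hd, List.map_map]
  refine List.map_congr_left (fun i _ => ?_)
  by_cases hic : i = cu
  · simp [hic]
  · simp [hic, Function.comp]

-- the cross-component pairs of an edge list (B's first pass, as map-of-filter)
def pairsOf (comp_id : List (String × Int)) (es : List (String × String)) : List (Int × Int) :=
  (es.filter (fun e => decide (pvLookD comp_id e.1 ≠ pvLookD comp_id e.2))).map
    (fun e => (pvLookD comp_id e.1, pvLookD comp_id e.2))

-- B's accumulating pass IS pairsOf
lemma pairs_fold (comp_id : List (String × Int)) (es : List (String × String)) :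
    es.foldl (fun acc e =>
      let cu := pvLookD comp_id e.1
      let cv := pvLookD comp_id e.2
      if cu ≠ cv then acc ++ [(cu, cv)] else acc) [] = pairsOf comp_id es := by
  have h := PySem.List.foldl_append_if
      (fun e => decide (pvLookD comp_id e.1 ≠ pvLookD comp_id e.2))
      (fun e => (pvLookD comp_id e.1, pvLookD comp_id e.2)) es []
  simpa [pairsOf] using h

-- the main loop invariant: folding A's step over es distributes the filtered pairs per key
lemma foldA_shape (comp_id : List (String × Int)) (k : Int) (es : List (String × String)) :
    ∀ (g : Int → PySem.Set Int) (d : PySem.Dict Int (PySem.Set Int)),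
    d.items = (PySem.List.pyRange 0 k 1).map (fun i => (i, g i)) →
    (∀ e ∈ es, pvLookD comp_id e.1 ≠ pvLookD comp_id e.2 →
        0 ≤ pvLookD comp_id e.1 ∧ pvLookD comp_id e.1 < k) →
    (es.foldl (fun d e =>
        let cu := pvLookD comp_id e.1
        let cv := pvLookD comp_id e.2
        if cu ≠ cv then d.modify cu PySem.Set.empty (fun s => PySem.Set.add s cv) else d) d).items =
      (PySem.List.pyRange 0 k 1).map (fun i =>
        (i, ((pairsOf comp_id es).filter (fun p => p.1 == i)).foldl
              (fun s p => PySem.Set.add s p.2) (g i))) := by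
  induction es with
  | nil => intro g d hd _; simpa [pairsOf] using hd
  | cons e es ih =>
    intro g d hd hp
    by_cases hcc : pvLookD comp_id e.1 = pvLookD comp_id e.2
    · simp only [List.foldl_cons, hcc, ne_eq, not_true_eq_false, if_false]
      rw [ih g d hd (fun e' he' => hp e' (List.mem_cons_of_mem _ he'))]
      simp [pairsOf, hcc]
    · have hmem : pvLookD comp_id e.1 ∈ PySem.List.pyRange 0 k 1 := by
        rw [PySem.List.mem_pyRange_one]
        exact hp e (List.mem_cons_self ..) hcc
      simp only [List.foldl_cons, if_pos hcc]
      rw [ih (fun i => if i = pvLookD comp_id e.1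
                        then PySem.Set.add (g (pvLookD comp_id e.1)) (pvLookD comp_id e.2)
                        else g i)
            _ (items_modify_shape _ g d _ _ (PySem.List.nodup_pyRange_one 0 k) hd hmem)
            (fun e' he' => hp e' (List.mem_cons_of_mem _ he'))]
      refine List.map_congr_left (fun i _ => ?_)
      have hpr : pairsOf comp_id (e :: es) =
          (pvLookD comp_id e.1, pvLookD comp_id e.2) :: pairsOf comp_id es := by
        simp [pairsOf, hcc]
      by_cases hic : i = pvLookD comp_id e.1
      · simp [hpr, hic]
      · simp [hpr, hic, Ne.symm hic]

-- ===== VERDICT (by name: the statement is the Claim_ definition above) =====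
theorem build_condensation_spec : Claim_equal_build_condensation := by
  intro edges comp_id k _ hpre
  unfold Spec_build_condensation build_condensation build_condensation_alt
  have hinit : ((PySem.List.pyRange 0 k 1).foldl
      (fun d i => d.insert i PySem.Set.empty) PySem.Dict.empty).items =
      (PySem.List.pyRange 0 k 1).map (fun i => (i, (PySem.Set.empty : PySem.Set Int))) := by
    have h := PySem.Dict.items_foldl_insert_fresh (l := PySem.List.pyRange 0 k 1)
      (k := fun i => i) (v := fun _ => (PySem.Set.empty : PySem.Set Int))
      (d := PySem.Dict.empty)
      (by intro a _; simp [PySem.Dict.contains_empty])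
      (by simpa using PySem.List.nodup_pyRange_one 0 k)
    simpa using h
  rw [foldA_shape comp_id k edges _ _ hinit (fun e he => (hpre e he).2.2), pairs_fold]
  refine List.map_congr_left (fun i _ => ?_)
  simp [PySem.Set.ofList_eq_foldl, List.foldl_map, PySem.Set.empty]
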